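-- pv_equiv track=rewrite | github.com/guilhermeDSB/Redux-Browser | src/browser/security/adblock_engine.py | _matches_hostname_set
-- ===== SOURCE A (Python) =====
-- def _matches_hostname_set(url_domain: str, hostname_set: set) -> bool:
--     """Verifica se o domínio ou qualquer ancestral está no set."""
--     if url_domain in hostname_set:
--         return True
--     parts = url_domain.split(".")
--     for i in range(1, len(parts)):
--         parent = ".".join(parts[i:])
--         if parent in hostname_set:
--             return True
--     return False
-- ===== SOURCE B (Python) =====
-- def _matches_hostname_set(url_domain: str, hostname_set: set) -> bool:
--     """Verifica se o domínio ou qualquer ancestral está no set."""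
--     for h in hostname_set:
--         if url_domain == h or url_domain.endswith("." + h):
--             return True
--     return False
-- ===== Notes on version B (the rewrite author's own statement) =====
-- stated objective: alternative
-- what changed: Instead of splitting the domain into labels and building every dot-aligned ancestor suffix to test against the set, B iterates over the set itself and tests each element h with url_domain == h or url_domain.endswith('.' + h); no split/join and no candidate-suffix construction.
import Mathlib
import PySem

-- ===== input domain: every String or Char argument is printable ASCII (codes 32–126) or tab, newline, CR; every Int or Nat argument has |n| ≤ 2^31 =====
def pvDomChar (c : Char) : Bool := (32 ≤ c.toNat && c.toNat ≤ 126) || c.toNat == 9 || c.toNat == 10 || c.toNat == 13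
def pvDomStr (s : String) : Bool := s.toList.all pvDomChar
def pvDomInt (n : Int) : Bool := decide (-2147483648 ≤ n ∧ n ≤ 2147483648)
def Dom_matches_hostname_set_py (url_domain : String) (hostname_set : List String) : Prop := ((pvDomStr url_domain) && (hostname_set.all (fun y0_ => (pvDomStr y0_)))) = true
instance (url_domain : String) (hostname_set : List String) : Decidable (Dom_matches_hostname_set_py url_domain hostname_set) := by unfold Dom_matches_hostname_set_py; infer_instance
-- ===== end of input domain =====

-- B replaces A's split-the-domain-and-build-every-ancestor-suffix scan by a single loop over the
-- set itself, testing equality or a dot-boundary endswith per element (objective: alternative).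

-- ===== PORT A =====
def matches_hostname_set_py (url_domain : String) (hostname_set : List String) : Bool :=
  if PySem.Set.contains hostname_set url_domain then true
  else
    let parts := (PySem.Str.split? url_domain ".").getD []
    (PySem.List.pyRange 1 (PySem.List.len parts) 1).any fun i =>
      PySem.Set.contains hostname_set (PySem.Str.join "." (PySem.List.slice parts (some i) none))

-- ===== PORT B =====
def matches_hostname_set_py_alt (url_domain : String) (hostname_set : List String) : Bool :=
  hostname_set.any fun h => url_domain == h || PySem.Str.endswith url_domain ("." ++ h)

-- ===== PRECONDITION & SPEC =====
def Spec_matches_hostname_set_py (url_domain : String) (hostname_set : List String) (out : Bool) : Prop := out = matches_hostname_set_py_alt url_domain hostname_set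
instance (url_domain : String) (hostname_set : List String) (out : Bool) : Decidable (Spec_matches_hostname_set_py url_domain hostname_set out) := by unfold Spec_matches_hostname_set_py; infer_instance

-- ===== CLAIM (what is proved, stated in full; the proofs are below) =====
def Claim_equal_matches_hostname_set_py : Prop := ∀ (url_domain : String) (hostname_set : List String), Dom_matches_hostname_set_py url_domain hostname_set → Spec_matches_hostname_set_py url_domain hostname_set (matches_hostname_set_py url_domain hostname_set)

-- ===== LEMMAS AND PROOFS =====

-- PySem's fuelled splitOn on a one-character separator is Mathlib's List.splitOn.
theorem splitOn_go_single (c : Char) (fuel : Nat) (l cur : List Char) (accs : List (List Char))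
    (hf : l.length ≤ fuel) :
    PySem.Chars.splitOn.go [c] fuel l cur accs =
      accs.reverse ++ List.modifyHead (cur.reverse ++ ·) (List.splitOn c l) := by
  induction fuel generalizing l cur accs with
  | zero =>
    have : l = [] := by simpa using hf
    subst this
    simp [PySem.Chars.splitOn.go, List.splitOn, List.splitOnP_nil]
  | succ fuel ih =>
    cases l with
    | nil => simp [PySem.Chars.splitOn.go, List.splitOn, List.splitOnP_nil]
    | cons x xs =>
      rw [PySem.Chars.splitOn.go]
      by_cases hx : c = x
      · subst hx
        have hpre : [c].isPrefixOf (c :: xs) = true := by simp [List.isPrefixOf]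
        simp only [hpre, if_true]
        rw [show List.drop [c].length (c :: xs) = xs from rfl]
        rw [ih xs [] (cur.reverse :: accs) (by simpa using Nat.le_of_succ_le_succ hf)]
        simp [List.splitOn, List.splitOnP_cons]
        exact congrFun List.modifyHead_id _
      · have hpre : [c].isPrefixOf (x :: xs) = false := by
          simp [List.isPrefixOf]; exact hx
        simp only [hpre, Bool.false_eq_true, if_false]
        rw [ih xs (x :: cur) accs (by simpa using Nat.le_of_succ_le_succ hf)]
        simp [List.splitOn, List.splitOnP_cons, Ne.symm hx, List.modifyHead_modifyHead,
          Function.comp_def]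

theorem splitOn_single (cs : List Char) (c : Char) :
    PySem.Chars.splitOn cs [c] = List.splitOn c cs := by
  rw [PySem.Chars.splitOn, splitOn_go_single c (cs.length + 1) cs [] [] (Nat.le_succ _)]
  simp
  exact congrFun List.modifyHead_id _

-- No piece produced by List.splitOn contains the separator.
theorem not_mem_splitOn (c : Char) (cs : List Char) :
    ∀ p ∈ List.splitOn c cs, c ∉ p := by
  induction cs with
  | nil => simp [List.splitOn, List.splitOnP_nil]
  | cons x xs ih =>
    by_cases hx : x = c
    · subst hx
      simp only [List.splitOn, List.splitOnP_cons, beq_self_eq_true, if_true]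
      intro p hp
      rcases List.mem_cons.mp hp with rfl | hp'
      · simp
      · exact ih p hp'
    · simp only [List.splitOn, List.splitOnP_cons, beq_iff_eq, hx, if_false]
      obtain ⟨h, t, he⟩ : ∃ h t, List.splitOnP (fun y => y == c) xs = h :: t :=
        List.exists_cons_of_ne_nil (List.splitOnP_ne_nil _ _)
      rw [he]
      intro p hp
      rcases List.mem_cons.mp hp with rfl | hp'
      · intro hmem
        rcases List.mem_cons.mp hmem with rfl | hmem'
        · exact hx rfl
        · exact ih h (by rw [List.splitOn, he]; exact List.mem_cons_self) hmem'
      · exact ih p (by rw [List.splitOn, he]; exact List.mem_cons_of_mem _ hp')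

theorem suffix_of_append_of_length_le {l a b : List Char}
    (h : l <:+ a ++ b) (hl : l.length ≤ b.length) : l <:+ b := by
  rcases List.suffix_or_suffix_of_suffix h (List.suffix_append a b) with h1 | h1
  · exact h1
  · have hb : b = l := List.IsSuffix.eq_of_length h1 (Nat.le_antisymm (h1.length_le) hl)
    rw [hb]

-- Dot-boundary suffixes of a joined dot-free part list are exactly the joins of proper tails.
theorem suffix_join_iff (ps : List (List Char)) (hdot : ∀ p ∈ ps, '.' ∉ p)
    (t : List Char) :
    ('.' :: t) <:+ PySem.Chars.join ['.'] ps ↔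
      ∃ i : Nat, 1 ≤ i ∧ i < ps.length ∧ t = PySem.Chars.join ['.'] (ps.drop i) := by
  induction ps generalizing t with
  | nil =>
    simp [PySem.Chars.join, List.intercalate, List.suffix_nil]
  | cons p ps ih =>
    cases ps with
    | nil =>
      rw [PySem.Chars.join_singleton]
      constructor
      · intro h
        exact absurd (h.subset (List.mem_cons_self)) (hdot p List.mem_cons_self)
      · rintro ⟨i, h1, h2, -⟩
        simp at h2; omega
    | cons q rest =>
      rw [PySem.Chars.join_cons_cons]
      set J := PySem.Chars.join ['.'] (q :: rest) with hJ
      constructor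
      · intro h
        rw [List.append_assoc] at h
        by_cases hlen : ('.' :: t).length ≤ ('.' :: J).length
        · have h2 : ('.' :: t) <:+ ('.' :: J) :=
            suffix_of_append_of_length_le (by simpa using h) (by simpa using hlen)
          by_cases heq : t.length = J.length
          · have heq2 : '.' :: t = '.' :: J :=
              List.IsSuffix.eq_of_length h2 (by simpa using heq)
            refine ⟨1, le_refl _, by simp, by simpa using heq2⟩
          · have hlt : ('.' :: t).length ≤ J.length := by
              simp at hlen heq ⊢; omega
            have h3 : ('.' :: t) <:+ J :=
              suffix_of_append_of_length_le (l := '.' :: t) (a := ['.']) (b := J)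
                (by simpa using h2) hlt
            obtain ⟨i, hi1, hi2, hi3⟩ :=
              (ih (fun p hp => hdot p (List.mem_cons_of_mem _ hp)) t).mp h3
            exact ⟨i + 1, by omega, by simp at hi2 ⊢; omega, by simpa using hi3⟩
        · obtain ⟨pre, hpre⟩ := h
          have hlp : pre.length < p.length := by
            have := congrArg List.length hpre
            simp at this hlen ⊢; omega
          have hp2 : pre <+: p :=
            List.prefix_of_prefix_length_le ⟨'.' :: t, hpre⟩ (List.prefix_append _ _)
              (le_of_lt hlp)
          obtain ⟨m, hm⟩ := hp2
          have hmne : m ≠ [] := by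
            intro h0
            rw [h0, List.append_nil] at hm
            have := congrArg List.length hm
            omega
          have hsplit : '.' :: t = m ++ ('.' :: J) := by
            rw [← hm, List.append_assoc] at hpre
            exact List.append_cancel_left hpre
          have hdm : '.' ∈ m := by
            cases m with
            | nil => exact absurd rfl hmne
            | cons a as =>
              have ha : '.' = a := by simpa using congrArg (·.head?) hsplit
              rw [ha]; exact List.mem_cons_self
          exact absurd (hm ▸ List.mem_append_right pre hdm) (hdot p List.mem_cons_self)
      · rintro ⟨i, hi1, hi2, rfl⟩
        rcases Nat.eq_or_lt_of_le hi1 with h1 | h1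
        · rw [← h1]
          simp only [List.drop_one, List.tail_cons]
          rw [← hJ]
          exact ⟨p, by simp⟩
        · have hstep : ∃ j : Nat, 1 ≤ j ∧ j < (q :: rest).length ∧
              PySem.Chars.join ['.'] ((p :: q :: rest).drop i) =
                PySem.Chars.join ['.'] ((q :: rest).drop j) := by
            refine ⟨i - 1, by omega, by simp at hi2 ⊢; omega, ?_⟩
            congr 1
            cases i with
            | zero => omega
            | succ k => simp
          obtain ⟨j, hj1, hj2, hj3⟩ := hstep
          rw [hj3]
          have h4 : ('.' :: PySem.Chars.join ['.'] ((q :: rest).drop j)) <:+ J :=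
            (ih (fun p hp => hdot p (List.mem_cons_of_mem _ hp)) _).mpr ⟨j, hj1, hj2, rfl⟩
          exact h4.trans ⟨p ++ ['.'], by simp⟩

theorem parts_eq (u : String) :
    (PySem.Str.split? u ".").getD [] = (List.splitOn '.' u.toList).map String.ofList := by
  simp [PySem.Str.split?, PySem.Chars.split?]
  rw [splitOn_single]

theorem join_drop_toList (u : String) (n : Nat) :
    (PySem.Str.join "." (((List.splitOn '.' u.toList).map String.ofList).drop n)).toList
      = PySem.Chars.join ['.'] ((List.splitOn '.' u.toList).drop n) := by
  rw [PySem.Str.toList_join, ← List.map_drop, List.map_map]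
  simp [Function.comp_def, String.toList_ofList]

theorem join_splitOn (u : String) :
    PySem.Chars.join ['.'] (List.splitOn '.' u.toList) = u.toList :=
  List.intercalate_splitOn u.toList '.'

-- B's per-element test, read as a proposition.
theorem b_pred (u h : String) :
    (u == h || PySem.Str.endswith u ("." ++ h)) = true ↔
      u = h ∨ ('.' :: h.toList) <:+ u.toList := by
  rw [Bool.or_eq_true, beq_iff_eq, PySem.Str.endswith_eq, PySem.Chars.endswith_iff]
  rw [show ("." ++ h).toList = '.' :: h.toList by rw [String.toList_append]; rfl]

-- A domain has ancestor t exactly when '.' :: t is a suffix; ancestors are joins of split tails.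
theorem ancestor_iff (u : String) (t : List Char) :
    ('.' :: t) <:+ u.toList ↔
      ∃ n : Nat, 1 ≤ n ∧ n < (List.splitOn '.' u.toList).length ∧
        t = PySem.Chars.join ['.'] ((List.splitOn '.' u.toList).drop n) := by
  conv_lhs => rw [← join_splitOn u]
  exact suffix_join_iff _ (not_mem_splitOn _ _) t

theorem main_eq (u : String) (hs : List String) :
    matches_hostname_set_py u hs = matches_hostname_set_py_alt u hs := by
  rw [Bool.eq_iff_iff]
  unfold matches_hostname_set_py matches_hostname_set_py_alt
  by_cases hc : PySem.Set.contains hs u = true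
  · simp only [hc, if_true, true_iff, List.any_eq_true]
    exact ⟨u, (PySem.Set.contains_iff hs u).mp hc, by simp⟩
  · rw [Bool.not_eq_true] at hc
    simp only [hc, Bool.false_eq_true, if_false]
    rw [parts_eq, List.any_eq_true, List.any_eq_true]
    constructor
    · rintro ⟨i, hi, hmem⟩
      rw [PySem.List.mem_pyRange_one] at hi
      have h0 : (0:Int) ≤ i := by omega
      rw [PySem.List.slice_from _ h0] at hmem
      set n := i.toNat with hn
      have hnb : n < (List.splitOn '.' u.toList).length := by
        simp [PySem.List.len] at hi
        omega
      have hn1 : 1 ≤ n := by omega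
      refine ⟨_, (PySem.Set.contains_iff hs _).mp hmem, ?_⟩
      rw [b_pred]
      right
      rw [ancestor_iff]
      exact ⟨n, hn1, hnb, join_drop_toList u n⟩
    · rintro ⟨h, hmem, hp⟩
      rw [b_pred] at hp
      rcases hp with rfl | hp
      · rw [(PySem.Set.contains_iff hs u).mpr hmem] at hc
        simp at hc
      · rw [ancestor_iff] at hp
        obtain ⟨n, hn1, hnb, ht⟩ := hp
        refine ⟨(n : Int), ?_, ?_⟩
        · rw [PySem.List.mem_pyRange_one]
          constructor
          · exact_mod_cast hn1
          · simp [PySem.List.len]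
            exact_mod_cast hnb
        · rw [PySem.List.slice_from _ (by positivity)]
          rw [Int.toNat_natCast]
          rw [PySem.Set.contains_iff]
          have heq : h = PySem.Str.join "." (((List.splitOn '.' u.toList).map String.ofList).drop n) := by
            rw [← String.toList_inj, join_drop_toList, ht]
          rwa [← heq]

-- ===== VERDICT (by name: the statement is the Claim_ definition above) =====
theorem matches_hostname_set_py_spec : Claim_equal_matches_hostname_set_py := by
  intro u hs _
  unfold Spec_matches_hostname_set_py
  exact main_eq u hs
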